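-- pv_equiv track=rewrite | github.com/philornot/SejmBot | SejmBotScraper/session_finder.py | _deduplicate_sessions
-- ===== SOURCE A (Python) =====
-- from typing import List, Dict, Optional
--
-- def _deduplicate_sessions(sessions: List[Dict[str, str]]) -> List[Dict[str, str]]:
--     """Usuwa duplikaty sesji na podstawie URL"""
--     unique_sessions = {}
--     for session in sessions:
--         url = session['url']
--         if url not in unique_sessions:
--             unique_sessions[url] = session
--         else:
--             # Zachowaj sesję z więcej danych
--             existing = unique_sessions[url]
--             if len(session.get('title', '')) > len(existing.get('title', '')):
--                 unique_sessions[url] = session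
--
--     return list(unique_sessions.values())
-- ===== SOURCE B (Python) =====
-- def _deduplicate_sessions(sessions):
--     """Usuwa duplikaty sesji na podstawie URL (group-then-reduce)."""
--     groups = {}
--     for session in sessions:
--         groups.setdefault(session['url'], []).append(session)
--     return [max(group, key=lambda s: len(s.get('title', '')))
--             for group in groups.values()]
-- ===== Notes on version B (the rewrite author's own statement) =====
-- stated objective: alternative
-- what changed: Replaces the online keep-best-so-far dict update with a two-phase group-then-reduce: first bucket all sessions per url in first-seen order, then pick each bucket's first longest-title session with max().
import Mathlib
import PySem

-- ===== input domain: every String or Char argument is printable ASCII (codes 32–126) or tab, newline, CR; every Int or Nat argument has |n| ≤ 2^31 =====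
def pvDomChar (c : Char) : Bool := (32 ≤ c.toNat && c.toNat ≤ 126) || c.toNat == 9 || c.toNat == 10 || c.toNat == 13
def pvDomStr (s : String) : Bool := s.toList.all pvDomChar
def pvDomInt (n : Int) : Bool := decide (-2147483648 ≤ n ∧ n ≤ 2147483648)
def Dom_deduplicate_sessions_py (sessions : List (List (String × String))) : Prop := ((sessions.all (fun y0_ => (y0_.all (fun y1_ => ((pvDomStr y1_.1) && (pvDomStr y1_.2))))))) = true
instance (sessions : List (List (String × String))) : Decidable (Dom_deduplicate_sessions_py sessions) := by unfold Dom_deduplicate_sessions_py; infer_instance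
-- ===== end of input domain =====

-- B replaces A's online keep-best-so-far dict update with a two-phase group-then-reduce
-- (bucket sessions per url, then pick each bucket's first longest-title session); alternative decomposition, same cost.


-- ===== PORT A =====
-- session['url'] : Pre_ guarantees the key is present, so the default "" is never used inside Pre_
def pvUrl (session : List (String × String)) : String :=
  (PySem.Dict.mk session).getD "url" ""

-- len(session.get('title', ''))
def pvTitleLen (session : List (String × String)) : Int :=
  PySem.Str.len ((PySem.Dict.mk session).getD "title" "")

-- loop body of A: 'if url not in unique_sessions: … else: keep the longer-titled one'
def pvStepA (u : PySem.Dict String (List (String × String))) (session : List (String × String)) :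
    PySem.Dict String (List (String × String)) :=
  let url := pvUrl session
  if u.contains url = false then
    u.insert url session
  else
    let existing := u.getD url []
    if pvTitleLen session > pvTitleLen existing then u.insert url session else u

def deduplicate_sessions_py (sessions : List (List (String × String))) : List (List (String × String)) :=
  (sessions.foldl pvStepA PySem.Dict.empty).values

-- ===== PORT B =====
-- groups.setdefault(session['url'], []).append(session)
def pvStepB (g : PySem.Dict String (List (List (String × String)))) (session : List (String × String)) :
    PySem.Dict String (List (List (String × String))) :=
  g.modify (pvUrl session) [] (fun l => l ++ [session])

-- max(group, key=lambda s: len(s.get('title',''))) — first maximum wins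
def pvBest (group : List (List (String × String))) : List (String × String) :=
  match group with
  | [] => []
  | h :: t => t.foldl (fun best s => if pvTitleLen s > pvTitleLen best then s else best) h

def deduplicate_sessions_py_alt (sessions : List (List (String × String))) : List (List (String × String)) :=
  ((sessions.foldl pvStepB PySem.Dict.empty).values).map pvBest

-- ===== PRECONDITION & SPEC =====
-- Pre_ excludes exactly the inputs where Python A (and B) raise KeyError: a session without the key 'url'.
def Pre_deduplicate_sessions_py (sessions : List (List (String × String))) : Prop :=
  ∀ session ∈ sessions, (PySem.Dict.mk session).contains "url" = true
instance (sessions : List (List (String × String))) : Decidable (Pre_deduplicate_sessions_py sessions) := by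
  unfold Pre_deduplicate_sessions_py; infer_instance

def pvWitness_deduplicate_sessions_py : (List (List (String × String))) :=
  [[("url", "u"), ("title", "ab")], [("url", "u"), ("title", "abc")], [("url", "v")]]

def Spec_deduplicate_sessions_py (sessions : List (List (String × String))) (out : List (List (String × String))) : Prop := out = deduplicate_sessions_py_alt sessions
instance (sessions : List (List (String × String))) (out : List (List (String × String))) : Decidable (Spec_deduplicate_sessions_py sessions out) := by unfold Spec_deduplicate_sessions_py; infer_instance

-- ===== CLAIM (what is proved, stated in full; the proofs are below) =====
def Claim_equal_deduplicate_sessions_py : Prop := ∀ (sessions : List (List (String × String))), Dom_deduplicate_sessions_py sessions → Pre_deduplicate_sessions_py sessions → Spec_deduplicate_sessions_py sessions (deduplicate_sessions_py sessions)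

-- ===== LEMMAS AND PROOFS =====

-- lookup through an items-level map of the values
theorem pv_get?_mk_map {ν ν' : Type} (f : ν → ν') (l : List (String × ν)) (k : String) :
    (PySem.Dict.mk (l.map (fun p => (p.1, f p.2)))).get? k
      = ((PySem.Dict.mk l).get? k).map f := by
  induction l with
  | nil => simp [PySem.Dict.get?]
  | cons p t ih =>
    obtain ⟨a, b⟩ := p
    simp only [List.map_cons, PySem.Dict.get?_mk_cons]
    split_ifs with h
    · simp
    · simpa using ih

theorem pvBest_append (l : List (List (String × String))) (s : List (String × String)) (h : l ≠ []) :
    pvBest (l ++ [s]) = if pvTitleLen s > pvTitleLen (pvBest l) then s else pvBest l := by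
  cases l with
  | nil => exact absurd rfl h
  | cons a t => simp [pvBest, List.foldl_append]

theorem pv_get?_none {ν : Type} (d : PySem.Dict String ν) (k : String)
    (h : d.contains k = false) : d.get? k = none := by
  rw [PySem.Dict.contains_eq_isSome_get?] at h
  cases hg : d.get? k
  · rfl
  · rw [hg] at h; simp at h

-- the invariant: A's dict is B's group dict with every group reduced by pvBest
theorem pv_invariant (rest : List (List (String × String)))
    (u : PySem.Dict String (List (String × String)))
    (g : PySem.Dict String (List (List (String × String))))
    (hitems : u.items = g.items.map (fun p => (p.1, pvBest p.2)))
    (hne : ∀ p ∈ g.items, p.2 ≠ [])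
    (hnd : g.keys.Nodup) :
    (rest.foldl pvStepA u).items
      = ((rest.foldl pvStepB g).items).map (fun p => (p.1, pvBest p.2)) := by
  induction rest generalizing u g with
  | nil => simpa using hitems
  | cons s t ih =>
    simp only [List.foldl_cons]
    set k := pvUrl s with hk
    have hu : u = PySem.Dict.mk (g.items.map (fun p => (p.1, pvBest p.2))) := by
      apply PySem.Dict.ext; simpa using hitems
    have hget : u.get? k = (g.get? k).map pvBest := by
      rw [hu]
      have := pv_get?_mk_map (f := pvBest) g.items k
      simpa using this
    have hcontains : u.contains k = g.contains k := by
      rw [PySem.Dict.contains_eq_isSome_get?, PySem.Dict.contains_eq_isSome_get?, hget]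
      cases g.get? k <;> rfl
    by_cases hc : g.contains k = true
    · -- key already present: B appends to the group, A keeps the longer-titled session
      obtain ⟨l, hl⟩ : ∃ l, g.get? k = some l := by
        rw [PySem.Dict.contains_eq_isSome_get?] at hc
        cases hgl : g.get? k with
        | none => rw [hgl] at hc; simp at hc
        | some l => exact ⟨l, rfl⟩
      have hlne : l ≠ [] := hne (k, l) (PySem.Dict.mem_items_of_get?_eq_some _ hl)
      have hB : pvStepB g s = g.insert k (l ++ [s]) := by
        simp only [pvStepB, ← hk, PySem.Dict.modify,
          PySem.Dict.getD_eq_get?_getD, hl, Option.getD_some]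
      have hgetDu : u.getD k [] = pvBest l := by
        rw [PySem.Dict.getD_eq_get?_getD, hget, hl]; rfl
      have hBitems : (pvStepB g s).items
          = g.items.map (fun p => if p.1 == k then (k, l ++ [s]) else p) := by
        rw [hB, PySem.Dict.items_insert_of_contains _ _ hc]
      have hstep : pvStepA u s
          = (if pvTitleLen s > pvTitleLen (pvBest l) then u.insert k s else u) := by
        simp [pvStepA, ← hk, hcontains.trans hc, hgetDu]
      have hp2l : ∀ p ∈ g.items, (p.1 == k) = true → p.2 = l := by
        intro p hp hpk
        obtain ⟨a, b⟩ := p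
        have h1 : g.get? a = some b := PySem.Dict.get?_of_mem_items g hp hnd
        have hpk' : a = k := by simpa using hpk
        rw [hpk', hl] at h1
        simpa using h1.symm
      have hmain : (pvStepA u s).items
          = ((pvStepB g s).items).map (fun p => (p.1, pvBest p.2)) := by
        rw [hstep, hBitems, List.map_map]
        by_cases hcond : pvTitleLen s > pvTitleLen (pvBest l)
        · rw [if_pos hcond,
            PySem.Dict.items_insert_of_contains _ _ (hcontains.trans hc), hitems,
            List.map_map]
          apply List.map_congr_left
          intro p hp
          by_cases hpk : (p.1 == k) = true
          · have hp2 := hp2l p hp hpk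
            simp only [Function.comp, hpk, if_pos rfl, if_true]
            simp [hp2, pvBest_append l s hlne, if_pos hcond]
          · simp [Function.comp, hpk]
        · rw [if_neg hcond, hitems]
          apply List.map_congr_left
          intro p hp
          by_cases hpk : (p.1 == k) = true
          · have hp2 := hp2l p hp hpk
            have hpk' : p.1 = k := by simpa using hpk
            simp only [Function.comp, hpk, if_true]
            simp [hp2, pvBest_append l s hlne, if_neg hcond, hpk']
          · simp [Function.comp, hpk]
      refine ih _ _ hmain ?_ ?_
      · intro p hp
        rw [hBitems] at hp
        obtain ⟨q, hq, hqe⟩ := List.mem_map.mp hp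
        by_cases hqk : (q.1 == k) = true
        · rw [if_pos hqk] at hqe; subst hqe; simp
        · rw [if_neg (by simpa using hqk)] at hqe; subst hqe; exact hne _ hq
      · have hkeys : (pvStepB g s).keys = g.keys := by
          simp only [PySem.Dict.keys, hBitems, List.map_map]
          apply List.map_congr_left
          intro p _
          by_cases hpk : (p.1 == k) = true
          · have hpk' : p.1 = k := by simpa using hpk
            simp [Function.comp, hpk, hpk']
          · simp [Function.comp, hpk]
        rw [hkeys]; exact hnd
    · -- fresh key: both dicts append a new entry
      have hc' : g.contains k = false := by simpa using hc
      have huc : u.contains k = false := by rw [hcontains]; exact hc'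
      have hgD : g.getD k [] = [] := by
        rw [PySem.Dict.getD_eq_get?_getD, pv_get?_none g k hc']; rfl
      have hB : pvStepB g s = g.insert k [s] := by
        simp only [pvStepB, ← hk, PySem.Dict.modify, hgD, List.nil_append]
      have hA : pvStepA u s = u.insert k s := by
        simp [pvStepA, ← hk, huc]
      have hmain : (pvStepA u s).items
          = ((pvStepB g s).items).map (fun p => (p.1, pvBest p.2)) := by
        rw [hA, hB, PySem.Dict.items_insert_of_not_contains _ _ huc,
          PySem.Dict.items_insert_of_not_contains _ _ hc', List.map_append, hitems]
        simp [pvBest]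
      refine ih _ _ hmain ?_ ?_
      · intro p hp
        rw [hB, PySem.Dict.items_insert_of_not_contains _ _ hc'] at hp
        rcases List.mem_append.mp hp with h | h
        · exact hne _ h
        · simp at h; subst h; simp
      · have hknot : k ∉ g.keys := by
          rw [PySem.Dict.contains_eq_decide_mem_keys] at hc'
          simpa using hc'
        rw [hB, PySem.Dict.keys_insert_of_not_contains _ _ hc']
        exact hnd.append (List.nodup_singleton k)
          (by intro a ha hb; simp at hb; subst hb; exact hknot ha)

-- ===== VERDICT (by name: the statement is the Claim_ definition above) =====
theorem deduplicate_sessions_py_spec : Claim_equal_deduplicate_sessions_py := by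
  intro sessions _ _
  unfold Spec_deduplicate_sessions_py deduplicate_sessions_py deduplicate_sessions_py_alt
  have h := pv_invariant sessions PySem.Dict.empty PySem.Dict.empty
    (by simp [PySem.Dict.empty]) (by simp [PySem.Dict.empty]) (by simp [PySem.Dict.empty, PySem.Dict.keys])
  simp only [PySem.Dict.values, h, List.map_map]
  rfl
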